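-- pv_equiv track=rewrite | github.com/JonathanServiaMandome/gsWord | utilities/aa_funciones.py | GetColumnasDL_VD
-- ===== SOURCE A (Python) =====
-- def GetColumnasDL_VD(arg=''):
-- 	columnas = []
-- 	columnas.append('vendedor')
-- 	if arg == 'v':
-- 		columnas.append('deno')
--
-- 	columnas.append('defecto')
--
-- 	dc = {}
-- 	for k in range(len(columnas)):
-- 		dc[columnas[k]] = k
-- 	return dc
-- ===== SOURCE B (Python) =====
-- def GetColumnasDL_VD(arg=''):
-- 	if arg == 'v':
-- 		return {'vendedor': 0, 'deno': 1, 'defecto': 2}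
-- 	return {'vendedor': 0, 'defecto': 1}
-- ===== Notes on version B (the rewrite author's own statement) =====
-- stated objective: simpler
-- what changed: Replaces the list-building plus range-indexed dict-assignment loop with two literal dicts selected by the single flag test; no list, no loop, no enumeration.
import Mathlib
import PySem

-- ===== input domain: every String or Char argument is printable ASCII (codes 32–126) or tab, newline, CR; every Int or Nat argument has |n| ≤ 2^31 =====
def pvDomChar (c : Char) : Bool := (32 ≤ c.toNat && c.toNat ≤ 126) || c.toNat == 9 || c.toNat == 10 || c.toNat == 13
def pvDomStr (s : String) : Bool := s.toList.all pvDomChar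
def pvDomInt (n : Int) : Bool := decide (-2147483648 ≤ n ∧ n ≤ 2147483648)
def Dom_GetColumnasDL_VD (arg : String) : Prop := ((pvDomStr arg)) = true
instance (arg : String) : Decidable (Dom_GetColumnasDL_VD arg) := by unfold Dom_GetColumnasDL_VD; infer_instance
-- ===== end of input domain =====

-- ===== PORT A =====
-- header: B replaces the list build + index loop with two literal dicts chosen by the flag (objective: simpler)
def GetColumnasDL_VD (arg : String) : List (String × Int) :=
  let columnas : List String := ([] : List String) ++ ["vendedor"]
  let columnas := if arg = "v" then columnas ++ ["deno"] else columnas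
  let columnas := columnas ++ ["defecto"]
  ((PySem.List.pyRange 0 (columnas.length) 1).foldl
    (fun dc k =>
      match PySem.List.pyGet? columnas k with
      | some c => PySem.Dict.insert dc c k
      | none => dc)  -- unreachable: k ranges over valid indices
    PySem.Dict.empty).items

-- ===== PORT B =====
def GetColumnasDL_VD_alt (arg : String) : List (String × Int) :=
  if arg = "v" then [("vendedor", 0), ("deno", 1), ("defecto", 2)]
  else [("vendedor", 0), ("defecto", 1)]

-- ===== PRECONDITION & SPEC =====
def Spec_GetColumnasDL_VD (arg : String) (out : List (String × Int)) : Prop := out = GetColumnasDL_VD_alt arg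
instance (arg : String) (out : List (String × Int)) : Decidable (Spec_GetColumnasDL_VD arg out) := by unfold Spec_GetColumnasDL_VD; infer_instance

-- ===== CLAIM (what is proved, stated in full; the proofs are below) =====
def Claim_equal_GetColumnasDL_VD : Prop := ∀ (arg : String), Dom_GetColumnasDL_VD arg → Spec_GetColumnasDL_VD arg (GetColumnasDL_VD arg)

-- ===== LEMMAS AND PROOFS =====

-- ===== VERDICT (by name: the statement is the Claim_ definition above) =====
theorem GetColumnasDL_VD_spec : Claim_equal_GetColumnasDL_VD := by
  intro arg _
  unfold Spec_GetColumnasDL_VD GetColumnasDL_VD GetColumnasDL_VD_alt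
  by_cases h : arg = "v" <;> simp only [h, if_pos, reduceIte] <;> rfl
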